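-- pv_equiv track=rewrite | github.com/turhanardil/omni-memory-v2 | backup_20250729_144637/web_search.py | categorize_query_type
-- ===== SOURCE A (Python) =====
-- def categorize_query_type(query: str) -> str:
--     """Simple categorization for backward compatibility."""
--     query_lower = query.lower()
--
--     if any(word in query_lower for word in ["weather", "temperature", "rain", "snow", "forecast"]):
--         return "weather"
--     elif any(word in query_lower for word in ["news", "latest", "recent", "happening", "update", "resignation"]):
--         return "news"
--     elif any(word in query_lower for word in ["stock", "price", "market"]):
--         return "stock"
--     else:
--         return "general"
-- ===== SOURCE B (Python) =====
-- _KEYWORD_PRIORITY = {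
--     "weather": 0, "temperature": 0, "rain": 0, "snow": 0, "forecast": 0,
--     "news": 1, "latest": 1, "recent": 1, "happening": 1, "update": 1, "resignation": 1,
--     "stock": 2, "price": 2, "market": 2,
-- }
-- _CATEGORIES = ["weather", "news", "stock", "general"]
--
-- def categorize_query_type(query: str) -> str:
--     """Simple categorization for backward compatibility."""
--     q = query.lower()
--     best = 3
--     for i in range(len(q)):
--         for kw, p in _KEYWORD_PRIORITY.items():
--             if p < best and q.startswith(kw, i):
--                 best = p
--     return _CATEGORIES[best]
-- ===== Notes on version B (the rewrite author's own statement) =====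
-- stated objective: alternative
-- what changed: Instead of A's per-keyword substring searches in a fixed if/elif chain, B scans the lowercased query once position by position, checks which keywords start at each position via a keyword-to-priority map, and keeps the minimum priority seen; the category is read off the best priority at the end.
import Mathlib
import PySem

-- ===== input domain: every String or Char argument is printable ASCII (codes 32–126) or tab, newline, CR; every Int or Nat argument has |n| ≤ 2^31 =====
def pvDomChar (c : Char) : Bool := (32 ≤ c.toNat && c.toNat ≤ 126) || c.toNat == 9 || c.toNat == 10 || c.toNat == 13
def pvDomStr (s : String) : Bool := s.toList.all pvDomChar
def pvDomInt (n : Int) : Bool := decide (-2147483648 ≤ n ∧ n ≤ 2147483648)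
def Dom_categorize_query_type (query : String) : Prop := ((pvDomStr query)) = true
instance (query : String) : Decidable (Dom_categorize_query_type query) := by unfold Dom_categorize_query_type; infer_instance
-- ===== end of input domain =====

-- B replaces A's per-keyword substring searches by a single position scan over the lowercased
-- query, accumulating the minimum priority of any keyword starting at each position (objective: alternative).

-- ===== PORT A =====
def categorize_query_type (query : String) : String :=
  let query_lower := PySem.Str.lower query
  if ["weather", "temperature", "rain", "snow", "forecast"].any (fun word => PySem.Str.isIn word query_lower) then
    "weather"
  else if ["news", "latest", "recent", "happening", "update", "resignation"].any (fun word => PySem.Str.isIn word query_lower) then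
    "news"
  else if ["stock", "price", "market"].any (fun word => PySem.Str.isIn word query_lower) then
    "stock"
  else
    "general"

-- ===== PORT B =====
-- _KEYWORD_PRIORITY.items() in insertion order
def pvKw : List (String × Nat) :=
  [("weather", 0), ("temperature", 0), ("rain", 0), ("snow", 0), ("forecast", 0),
   ("news", 1), ("latest", 1), ("recent", 1), ("happening", 1), ("update", 1), ("resignation", 1),
   ("stock", 2), ("price", 2), ("market", 2)]

-- inner loop body: q.startswith(kw, i) for 0 ≤ i is exactly kw.toList.isPrefixOf (q.drop i)
def pvScanAt (d : List Char) (b : Nat) : Nat :=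
  pvKw.foldl (fun b' r => if r.2 < b' && r.1.toList.isPrefixOf d then r.2 else b') b

def categorize_query_type_alt (query : String) : String :=
  let q := PySem.Str.lower query
  let best := (List.range q.toList.length).foldl (fun b i => pvScanAt (q.toList.drop i) b) 3
  -- _CATEGORIES[best]: best ≤ 3 always, so the index is in range
  ["weather", "news", "stock", "general"].getD best "general"

-- ===== PRECONDITION & SPEC =====
def Spec_categorize_query_type (query : String) (out : String) : Prop := out = categorize_query_type_alt query
instance (query : String) (out : String) : Decidable (Spec_categorize_query_type query out) := by unfold Spec_categorize_query_type; infer_instance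

-- ===== CLAIM (what is proved, stated in full; the proofs are below) =====
def Claim_equal_categorize_query_type : Prop := ∀ (query : String), Dom_categorize_query_type query → Spec_categorize_query_type query (categorize_query_type query)

-- ===== LEMMAS AND PROOFS =====

-- inner fold, generalized over the keyword list for induction
def pvInnF (d : List Char) (L : List (String × Nat)) (b : Nat) : Nat :=
  L.foldl (fun b' r => if r.2 < b' && r.1.toList.isPrefixOf d then r.2 else b') b

theorem pvInnF_le (d : List Char) (L : List (String × Nat)) (b : Nat) : pvInnF d L b ≤ b := by
  induction L generalizing b with
  | nil => simp [pvInnF]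
  | cons r L ih =>
    simp only [pvInnF, List.foldl_cons] at *
    split_ifs with h
    · exact le_trans (ih _) (by simp only [Bool.and_eq_true, decide_eq_true_eq] at h; omega)
    · exact ih b

theorem pvInnF_le_iff (d : List Char) (L : List (String × Nat)) (b k : Nat) :
    pvInnF d L b ≤ k ↔ b ≤ k ∨ ∃ r ∈ L, r.2 ≤ k ∧ r.1.toList <+: d := by
  induction L generalizing b with
  | nil => simp [pvInnF]
  | cons r L ih =>
    rw [show pvInnF d (r :: L) b
        = pvInnF d L (if r.2 < b && r.1.toList.isPrefixOf d then r.2 else b) from rfl, ih]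
    simp only [List.mem_cons]
    have hpref : r.1.toList.isPrefixOf d = true ↔ r.1.toList <+: d := by
      simp [List.isPrefixOf_iff_prefix]
    split_ifs with h
    · simp only [Bool.and_eq_true, decide_eq_true_eq] at h
      obtain ⟨hlt, hp⟩ := h
      rw [hpref] at hp
      constructor
      · rintro (h1 | ⟨s, hs, h1, h2⟩)
        · exact Or.inr ⟨r, Or.inl rfl, h1, hp⟩
        · exact Or.inr ⟨s, Or.inr hs, h1, h2⟩
      · rintro (h1 | ⟨s, hs | hs, h1, h2⟩)
        · exact Or.inl (by omega)
        · exact Or.inl (by subst hs; exact h1)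
        · exact Or.inr ⟨s, hs, h1, h2⟩
    · simp only [Bool.and_eq_true, decide_eq_true_eq, not_and] at h
      constructor
      · rintro (h1 | ⟨s, hs, h1, h2⟩)
        · exact Or.inl h1
        · exact Or.inr ⟨s, Or.inr hs, h1, h2⟩
      · rintro (h1 | ⟨s, hs | hs, h1, h2⟩)
        · exact Or.inl h1
        · subst hs
          by_cases hlt : s.2 < b
          · exact absurd (hpref.mpr h2) (h hlt)
          · exact Or.inl (by omega)
        · exact Or.inr ⟨s, hs, h1, h2⟩

theorem pvScanAt_eq (d : List Char) (b : Nat) : pvScanAt d b = pvInnF d pvKw b := rfl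

-- outer fold characterization
theorem pvOut_le_iff (q : List Char) (n b k : Nat) :
    (List.range n).foldl (fun b i => pvScanAt (q.drop i) b) b ≤ k ↔
    b ≤ k ∨ ∃ i < n, ∃ r ∈ pvKw, r.2 ≤ k ∧ r.1.toList <+: q.drop i := by
  induction n generalizing b with
  | zero => simp
  | succ n ih =>
    rw [List.range_succ, List.foldl_append, List.foldl_cons, List.foldl_nil,
      pvScanAt_eq, pvInnF_le_iff, ih]
    constructor
    · rintro ((h | ⟨i, hi, r, hr, h1, h2⟩) | ⟨r, hr, h1, h2⟩)
      · exact Or.inl h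
      · exact Or.inr ⟨i, Nat.lt_succ_of_lt hi, r, hr, h1, h2⟩
      · exact Or.inr ⟨n, Nat.lt_succ_self n, r, hr, h1, h2⟩
    · rintro (h | ⟨i, hi, r, hr, h1, h2⟩)
      · exact Or.inl (Or.inl h)
      · rcases Nat.lt_succ_iff_lt_or_eq.mp hi with hi | hi
        · exact Or.inl (Or.inr ⟨i, hi, r, hr, h1, h2⟩)
        · exact Or.inr ⟨r, hr, h1, by subst hi; exact h2⟩

theorem pvOut_le_init (q : List Char) (n b : Nat) :
    (List.range n).foldl (fun b i => pvScanAt (q.drop i) b) b ≤ b := by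
  induction n generalizing b with
  | zero => simp
  | succ n ih =>
    rw [List.range_succ, List.foldl_append, List.foldl_cons, List.foldl_nil]
    exact le_trans (pvInnF_le (q.drop n) pvKw _) (ih b)

-- bounded vs unbounded position existence, for a nonempty keyword
theorem pvExists_pos_iff (q sub : List Char) (hne : sub ≠ []) (n : Nat) (hn : n = q.length) :
    (∃ i < n, sub <+: q.drop i) ↔ PySem.Chars.isIn sub q = true := by
  rw [← PySem.Chars.exists_prefix_drop_iff_isIn]
  constructor
  · rintro ⟨i, _, h⟩; exact ⟨i, h⟩
  · rintro ⟨j, h⟩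
    by_cases hj : j < n
    · exact ⟨j, hj, h⟩
    · exfalso
      have : q.drop j = [] := List.drop_eq_nil_of_le (by omega)
      rw [this] at h
      exact hne (List.prefix_nil.mp h)

-- ===== VERDICT (by name: the statement is the Claim_ definition above) =====
theorem categorize_query_type_spec : Claim_equal_categorize_query_type := by
  intro query _
  unfold Spec_categorize_query_type
  simp only [categorize_query_type, categorize_query_type_alt]
  set q : List Char := (PySem.Str.lower query).toList with hq
  set F : Nat := (List.range q.length).foldl (fun b i => pvScanAt (q.drop i) b) 3 with hF
  have hF3 : F ≤ 3 := pvOut_le_init q q.length 3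
  have key : ∀ k : Nat, k < 3 → (F ≤ k ↔ ∃ r ∈ pvKw, r.2 ≤ k ∧ PySem.Chars.isIn r.1.toList q = true) := by
    intro k hk
    rw [hF, pvOut_le_iff]
    constructor
    · rintro (h | ⟨i, hi, r, hr, h1, h2⟩)
      · omega
      · refine ⟨r, hr, h1, ?_⟩
        rw [← pvExists_pos_iff q r.1.toList ?_ q.length rfl]
        · exact ⟨i, hi, h2⟩
        · fin_cases hr <;> simp
    · rintro ⟨r, hr, h1, h2⟩
      right
      have hne : r.1.toList ≠ [] := by fin_cases hr <;> simp
      obtain ⟨i, hi, hp⟩ := (pvExists_pos_iff q r.1.toList hne q.length rfl).mpr h2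
      exact ⟨i, hi, r, hr, h1, hp⟩
  have c0 := key 0 (by omega)
  have c1 := key 1 (by omega)
  have c2 := key 2 (by omega)
  simp only [pvKw, List.mem_cons, List.not_mem_nil] at c0 c1 c2
  norm_num at c0 c1 c2
  clear_value F q
  simp only [List.any_cons, List.any_nil, Bool.or_eq_true, Bool.false_eq_true, or_false,
    PySem.Str.isIn_eq, ← hq]
  split_ifs with h1 h2 h3
  · simp [c0.mpr h1]
  · have hle : F ≤ 1 := c1.mpr (Or.inr (Or.inr (Or.inr (Or.inr (Or.inr (h2))))))
    have hne : F ≠ 0 := fun h => h1 (c0.mp h)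
    have h1' : F = 1 := by omega
    simp [h1']
  · have hle : F ≤ 2 := c2.mpr (Or.inr (Or.inr (Or.inr (Or.inr (Or.inr (Or.inr (Or.inr (Or.inr (Or.inr (Or.inr (Or.inr (h3))))))))))))
    have hne : ¬ F ≤ 1 := fun h => by
      rcases c1.mp h with hh|hh|hh|hh|hh|hh|hh|hh|hh|hh|hh
      exacts [h1 (Or.inl hh), h1 (Or.inr (Or.inl hh)), h1 (Or.inr (Or.inr (Or.inl hh))), h1 (Or.inr (Or.inr (Or.inr (Or.inl hh)))), h1 (Or.inr (Or.inr (Or.inr (Or.inr hh)))), h2 (Or.inl hh), h2 (Or.inr (Or.inl hh)), h2 (Or.inr (Or.inr (Or.inl hh))), h2 (Or.inr (Or.inr (Or.inr (Or.inl hh)))), h2 (Or.inr (Or.inr (Or.inr (Or.inr (Or.inl hh))))), h2 (Or.inr (Or.inr (Or.inr (Or.inr (Or.inr hh)))))]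
    have h2' : F = 2 := by omega
    simp [h2']
  · have hne : ¬ F ≤ 2 := fun h => by
      rcases c2.mp h with hh|hh|hh|hh|hh|hh|hh|hh|hh|hh|hh|hh|hh|hh
      exacts [h1 (Or.inl hh), h1 (Or.inr (Or.inl hh)), h1 (Or.inr (Or.inr (Or.inl hh))), h1 (Or.inr (Or.inr (Or.inr (Or.inl hh)))), h1 (Or.inr (Or.inr (Or.inr (Or.inr hh)))), h2 (Or.inl hh), h2 (Or.inr (Or.inl hh)), h2 (Or.inr (Or.inr (Or.inl hh))), h2 (Or.inr (Or.inr (Or.inr (Or.inl hh)))), h2 (Or.inr (Or.inr (Or.inr (Or.inr (Or.inl hh))))), h2 (Or.inr (Or.inr (Or.inr (Or.inr (Or.inr hh))))), h3 (Or.inl hh), h3 (Or.inr (Or.inl hh)), h3 (Or.inr (Or.inr hh))]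
    have h3' : F = 3 := by omega
    simp [h3']
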